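-- pv_equiv track=rewrite | github.com/gpoesia/certified-reasoning | learning/util.py | batch_strings
-- ===== SOURCE A (Python) =====
-- def batch_strings(s: list[str], batch_size: int) -> list[str]:
--     '''Batches a list of strings into small batches with a bounded
--     total number of characters in each.'''
--
--     batches = []
--
--     stack = s[::-1]
--
--     while stack:
--         batch = []
--         max_size = 0
--
--         while stack:
--             example = stack.pop()
--             max_size = max(max_size, len(example))
--
--             if batch and max_size * (1 + len(batch)) > batch_size:
--                 stack.append(example)
--                 break
--
--             batch.append(example)
--         batches.append(batch)
--
--     return batches
-- ===== SOURCE B (Python) =====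
-- def batch_strings(s: list[str], batch_size: int) -> list[str]:
--     '''Batches a list of strings into small batches with a bounded
--     total number of characters in each.'''
--     batches = []
--     batch = []
--     max_size = 0
--     for x in s:
--         m = max(max_size, len(x))
--         if batch and m * (1 + len(batch)) > batch_size:
--             batches.append(batch)
--             batch = [x]
--             max_size = len(x)
--         else:
--             batch.append(x)
--             max_size = m
--     if batch:
--         batches.append(batch)
--     return batches
-- ===== Notes on version B (the rewrite author's own statement) =====
-- stated objective: simpler
-- what changed: Replaced the reversed-list stack with nested while loops and push-back/break reprocessing by a single forward for loop carrying the current batch and its running max length, flushing the batch inline.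
import Mathlib
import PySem

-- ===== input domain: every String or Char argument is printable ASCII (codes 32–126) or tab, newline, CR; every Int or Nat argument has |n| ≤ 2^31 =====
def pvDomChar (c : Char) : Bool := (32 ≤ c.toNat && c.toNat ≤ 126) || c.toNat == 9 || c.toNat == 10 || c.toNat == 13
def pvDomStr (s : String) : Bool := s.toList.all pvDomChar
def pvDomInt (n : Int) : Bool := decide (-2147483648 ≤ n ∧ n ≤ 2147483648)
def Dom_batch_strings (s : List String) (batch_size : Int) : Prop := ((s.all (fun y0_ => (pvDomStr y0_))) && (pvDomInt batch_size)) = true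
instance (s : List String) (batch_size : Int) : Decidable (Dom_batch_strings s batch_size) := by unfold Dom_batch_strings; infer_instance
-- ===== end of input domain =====

-- B replaces A's nested while loops over a reversed-list stack (with push-back/break
-- reprocessing) by one forward pass carrying the current batch and its running max length.

-- ===== PORT A =====
-- inner `while stack:` loop: pops from the end of `stack`, returns (batch, remaining stack)
def bsInner (batch_size : Int) (stack batch : List String) (max_size : Int) :
    List String × List String :=
  match h : stack.getLast? with
  | none => (batch, stack)
  | some exm =>
      let stack' := stack.dropLast
      let ms := max max_size (PySem.Str.len exm)
      if batch ≠ [] ∧ ms * (1 + PySem.List.len batch) > batch_size then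
        (batch, stack' ++ [exm])          -- stack.append(example); break
      else
        bsInner batch_size stack' (batch ++ [exm]) ms
termination_by stack.length
decreasing_by
  cases stack with
  | nil => simp at h
  | cons a t => simp [List.length_dropLast]

-- equation lemmas for bsInner (the dependent match is awkward to unfold directly)
theorem bsInner_nil (bs : Int) (batch : List String) (m : Int) :
    bsInner bs [] batch m = (batch, []) := by
  rw [bsInner]
  rfl

theorem bsInner_concat (bs : Int) (ys : List String) (x : String) (batch : List String)
    (m : Int) :
    bsInner bs (ys ++ [x]) batch m =
      (if batch ≠ [] ∧ max m (PySem.Str.len x) * (1 + PySem.List.len batch) > bs then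
        (batch, ys ++ [x])
      else bsInner bs ys (batch ++ [x]) (max m (PySem.Str.len x))) := by
  rw [bsInner]
  split
  · rename_i h; simp at h
  · rename_i exm h
    rw [List.getLast?_concat] at h
    cases h
    simp

-- the inner loop never grows the stack (needed for bsOuter's termination)
theorem bsInner_snd_le (bs : Int) (stack batch : List String) (m : Int) :
    (bsInner bs stack batch m).2.length ≤ stack.length := by
  induction stack using List.reverseRecOn generalizing batch m with
  | nil => rw [bsInner_nil]
  | append_singleton ys x ih =>
      rw [bsInner_concat]
      split
      · simp
      · have := ih (batch ++ [x]) (max m (PySem.Str.len x))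
        simp only [List.length_append, List.length_cons, List.length_nil]
        omega

-- starting a fresh batch on a nonempty stack strictly shrinks the stack
theorem bsInner_snd_lt (bs : Int) (stack : List String) (m : Int) (hne : stack ≠ []) :
    (bsInner bs stack [] m).2.length < stack.length := by
  rcases List.eq_nil_or_concat stack with h | ⟨ys, x, h⟩
  · exact absurd h hne
  · subst h
    rw [List.concat_eq_append, bsInner_concat]
    simp only [ne_eq, not_true_eq_false, false_and, if_neg, not_false_eq_true, List.nil_append]
    have := bsInner_snd_le bs ys [x] (max m (PySem.Str.len x))
    simp only [List.length_append, List.length_cons, List.length_nil]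
    omega

-- outer `while stack:` loop
def bsOuter (batch_size : Int) (stack : List String) (batches : List (List String)) :
    List (List String) :=
  if h : stack = [] then batches
  else
    let r := bsInner batch_size stack [] 0
    bsOuter batch_size r.2 (batches ++ [r.1])
termination_by stack.length
decreasing_by exact bsInner_snd_lt batch_size stack 0 h

def batch_strings (s : List String) (batch_size : Int) : List (List String) :=
  -- stack = s[::-1]  (PySem.List.slice?_none_none_neg_one : s[::-1] = s.reverse)
  bsOuter batch_size s.reverse []

-- ===== PORT B =====
-- one forward step of B's for loop; state = (batches, batch, max_size)
def bsStep (batch_size : Int) (st : List (List String) × List String × Int) (x : String) :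
    List (List String) × List String × Int :=
  let m := max st.2.2 (PySem.Str.len x)
  if st.2.1 ≠ [] ∧ m * (1 + PySem.List.len st.2.1) > batch_size then
    (st.1 ++ [st.2.1], [x], PySem.Str.len x)
  else
    (st.1, st.2.1 ++ [x], m)

def batch_strings_alt (s : List String) (batch_size : Int) : List (List String) :=
  let st := s.foldl (bsStep batch_size) ([], [], 0)
  if st.2.1 ≠ [] then st.1 ++ [st.2.1] else st.1

-- ===== PRECONDITION & SPEC =====
def Spec_batch_strings (s : List String) (batch_size : Int) (out : List (List String)) : Prop := out = batch_strings_alt s batch_size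
instance (s : List String) (batch_size : Int) (out : List (List String)) : Decidable (Spec_batch_strings s batch_size out) := by unfold Spec_batch_strings; infer_instance

-- ===== CLAIM (what is proved, stated in full; the proofs are below) =====
def Claim_equal_batch_strings : Prop := ∀ (s : List String) (batch_size : Int), Dom_batch_strings s batch_size → Spec_batch_strings s batch_size (batch_strings s batch_size)

-- ===== LEMMAS AND PROOFS =====

-- the B-side finalization
def bsFin (st : List (List String) × List String × Int) : List (List String) :=
  if st.2.1 ≠ [] then st.1 ++ [st.2.1] else st.1

theorem str_len_nonneg (x : String) : 0 ≤ PySem.Str.len x := by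
  simp [PySem.Str.len_eq]

theorem max_zero_len (x : String) : max (0 : Int) (PySem.Str.len x) = PySem.Str.len x :=
  max_eq_right (str_len_nonneg x)

-- main invariant: A's inner-loop continuation over xs.reverse equals B's fold over xs
theorem bsMain (bs : Int) (xs : List String) :
    ∀ (batch : List String) (m : Int) (batches : List (List String)), batch ≠ [] →
      bsOuter bs (bsInner bs xs.reverse batch m).2
        (batches ++ [(bsInner bs xs.reverse batch m).1])
      = bsFin (xs.foldl (bsStep bs) (batches, batch, m)) := by
  induction xs with
  | nil =>
      intro batch m batches hb
      rw [List.reverse_nil, bsInner_nil]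
      rw [bsOuter]
      simp [bsFin, hb]
  | cons x t ih =>
      intro batch m batches hb
      have hrev : (x :: t).reverse = t.reverse ++ [x] := by simp
      rw [hrev, bsInner_concat]
      by_cases c : max m (PySem.Str.len x) * (1 + PySem.List.len batch) > bs
      · -- flush case
        rw [if_pos ⟨hb, c⟩]
        -- A: outer restarts with a fresh batch on stack t.reverse ++ [x]
        rw [bsOuter]
        rw [dif_neg (by simp)]
        simp only []
        rw [bsInner_concat]
        simp only [ne_eq, not_true_eq_false, false_and, if_neg, not_false_eq_true,
          List.nil_append, max_zero_len]
        rw [ih [x] (PySem.Str.len x) (batches ++ [batch]) (by simp)]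
        -- B: step flushes too
        have hstep : bsStep bs (batches, batch, m) x
            = (batches ++ [batch], [x], PySem.Str.len x) := by
          unfold bsStep
          rw [if_pos ⟨hb, c⟩]
        rw [List.foldl_cons, hstep]
      · -- accumulate case
        rw [if_neg (fun hh => c hh.2)]
        rw [ih (batch ++ [x]) (max m (PySem.Str.len x)) batches (by simp)]
        have hstep : bsStep bs (batches, batch, m) x
            = (batches, batch ++ [x], max m (PySem.Str.len x)) := by
          unfold bsStep
          rw [if_neg (fun hh => c hh.2)]
        rw [List.foldl_cons, hstep]

-- ===== VERDICT (by name: the statement is the Claim_ definition above) =====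
theorem batch_strings_spec : Claim_equal_batch_strings := by
  intro s bs _
  unfold Spec_batch_strings batch_strings batch_strings_alt
  rcases List.eq_nil_or_concat s.reverse with h | ⟨ys, x, h⟩
  · have hs : s = [] := by simpa using congrArg List.reverse h
    subst hs
    rw [bsOuter]
    simp
  · have hs : s = x :: ys.reverse := by
      have := congrArg List.reverse h
      simpa using this
    subst hs
    rw [h, bsOuter, dif_neg (by simp)]
    simp only [List.concat_eq_append]
    rw [bsInner_concat]
    simp only [ne_eq, not_true_eq_false, false_and, if_neg, not_false_eq_true, List.nil_append]
    have hrr : ys = ys.reverse.reverse := by simp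
    rw [show bsInner bs ys [x] (max 0 (PySem.Str.len x))
          = bsInner bs ys.reverse.reverse [x] (max 0 (PySem.Str.len x)) by rw [← hrr]]
    have hm := bsMain bs ys.reverse [x] (max 0 (PySem.Str.len x)) [] (by simp)
    simp only [List.nil_append] at hm
    rw [hm]
    simp [bsFin, bsStep]
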